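-- pv_equiv track=rewrite | github.com/labepi/class-ai | reinforcement/tictactoe.py | empty_positions
-- ===== SOURCE A (Python) =====
-- EMPTY = "_"
--
-- def empty_positions(state):
--     """
--     """
--     ans = []
--     size = state.count(EMPTY)
--     p = 0
--     while len(ans) < size:
--         p = state.index(EMPTY, p)
--         ans.append(p)
--         p = p + 1
--     return ans
-- ===== SOURCE B (Python) =====
-- EMPTY = "_"
--
-- def empty_positions(state):
--     return [i for i, c in enumerate(state) if c == EMPTY]
-- ===== Notes on version B (the rewrite author's own statement) =====
-- stated objective: simpler
-- what changed: Replaces the count precomputation and the count-driven loop of repeated state.index(EMPTY, p) searches with one direct enumerate pass that collects the indices of empty cells.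
import Mathlib
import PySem

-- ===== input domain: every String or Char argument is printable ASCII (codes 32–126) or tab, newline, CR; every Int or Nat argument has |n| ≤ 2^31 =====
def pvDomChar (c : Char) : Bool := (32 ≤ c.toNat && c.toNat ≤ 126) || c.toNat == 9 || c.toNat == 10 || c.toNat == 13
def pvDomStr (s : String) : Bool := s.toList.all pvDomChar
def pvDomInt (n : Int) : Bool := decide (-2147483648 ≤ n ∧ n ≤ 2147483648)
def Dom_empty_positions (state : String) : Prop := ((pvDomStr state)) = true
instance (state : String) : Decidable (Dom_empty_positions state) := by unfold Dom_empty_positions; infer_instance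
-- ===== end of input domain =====

-- B replaces A's count + repeated str.index searches with one enumerate pass; objective: simpler.

-- ===== PORT A =====
-- the while loop: runs while ans.length < size; str.index(EMPTY, p) is findFrom
-- (the -1 branch would be Python's ValueError; it is unreachable, the guard only makes the port total)
def epLoop (cs : List Char) (size : Nat) (p : Int) (ans : List Int) : List Int :=
  if hlt : ans.length < size then
    let q := PySem.Chars.findFrom cs ['_'] p none
    if q = -1 then ans
    else epLoop cs size (q + 1) (ans ++ [q])
  else ans
termination_by size - ans.length
decreasing_by simp [List.length_append]; omega

def empty_positions (state : String) : List Int :=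
  epLoop state.toList (PySem.Str.count state "_") 0 []

-- ===== PORT B =====
def empty_positions_alt (state : String) : List Int :=
  (PySem.List.enumerate state.toList 0).filterMap
    (fun ic => if ic.2 = '_' then some ic.1 else none)

-- ===== PRECONDITION & SPEC =====
def Spec_empty_positions (state : String) (out : List Int) : Prop := out = empty_positions_alt state
instance (state : String) (out : List Int) : Decidable (Spec_empty_positions state out) := by unfold Spec_empty_positions; infer_instance

-- ===== CLAIM (what is proved, stated in full; the proofs are below) =====
def Claim_equal_empty_positions : Prop := ∀ (state : String), Dom_empty_positions state → Spec_empty_positions state (empty_positions state)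

-- ===== LEMMAS AND PROOFS =====

-- reference function: indices (offset by b) of '_' in a list
def gIdx (t : List Char) (b : Int) : List Int :=
  match t with
  | [] => []
  | c :: t => if c = '_' then b :: gIdx t (b + 1) else gIdx t (b + 1)

theorem alt_eq_gIdx (t : List Char) (b : Int) :
    (PySem.List.enumerate t b).filterMap (fun ic => if ic.2 = '_' then some ic.1 else none)
      = gIdx t b := by
  induction t generalizing b with
  | nil => simp [PySem.List.enumerate_nil, gIdx]
  | cons c t ih =>
    rw [PySem.List.enumerate_cons]
    by_cases h : c = '_' <;> simp [gIdx, h, ih]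

-- find points at the first occurrence; this pins its value
theorem find_eq_of (l sub : List Char) (j : Nat) (hpre : sub <+: l.drop j)
    (hmin : ∀ i < j, ¬ sub <+: l.drop i) : PySem.Chars.find l sub = (j : Int) := by
  have hinf : sub <:+: l := hpre.isInfix.trans (List.drop_suffix j l).isInfix
  have h0 : 0 ≤ PySem.Chars.find l sub := (PySem.Chars.find_nonneg_iff l sub).2 hinf
  obtain ⟨hp, hm⟩ := PySem.Chars.find_spec h0
  rcases lt_trichotomy (PySem.Chars.find l sub).toNat j with hlt | heq | hgt
  · exact absurd hp (hmin _ hlt)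
  · omega
  · exact absurd hpre (hm _ hgt)

theorem find_cons_self (t : List Char) : PySem.Chars.find ('_' :: t) ['_'] = 0 := by
  have := find_eq_of ('_' :: t) ['_'] 0 (by simp) (by omega)
  simpa using this

theorem find_cons_ne (c : Char) (t : List Char) (hc : c ≠ '_') :
    PySem.Chars.find (c :: t) ['_'] =
      if PySem.Chars.find t ['_'] = -1 then -1 else PySem.Chars.find t ['_'] + 1 := by
  by_cases hmem : '_' ∈ t
  · have h0 : 0 ≤ PySem.Chars.find t ['_'] := by
      rw [PySem.Chars.find_nonneg_iff]
      obtain ⟨s, t', rfl⟩ := List.append_of_mem hmem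
      exact ⟨s, t', by simp⟩
    obtain ⟨hp, hm⟩ := PySem.Chars.find_spec h0
    have hne : PySem.Chars.find t ['_'] ≠ -1 := by omega
    rw [if_neg hne]
    have := find_eq_of (c :: t) ['_'] ((PySem.Chars.find t ['_']).toNat + 1)
      (by simpa using hp)
      (by
        intro i hi
        cases i with
        | zero =>
          intro hpre
          obtain ⟨l', hl', -⟩ := List.cons_prefix_iff.1 hpre
          simp at hl'
          exact hc hl'.1
        | succ i => simpa using hm i (by omega))
    omega
  · have hnt : PySem.Chars.find t ['_'] = -1 := by
      rw [PySem.Chars.find_eq_neg_one_iff]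
      intro hinf
      exact hmem (List.singleton_sublist.1 hinf.sublist)
    rw [if_pos hnt]
    rw [PySem.Chars.find_eq_neg_one_iff]
    intro hinf
    have hm2 : '_' ∈ c :: t := List.singleton_sublist.1 hinf.sublist
    rcases List.mem_cons.1 hm2 with h | h
    · exact hc h.symm
    · exact hmem h

-- the main loop invariant: from position b with the remaining tail t = cs.drop b,
-- the loop appends exactly the indices of '_' in t
theorem epLoop_eq (t : List Char) : ∀ (cs : List Char) (b : Nat) (ans : List Int),
    b + t.length = cs.length → cs.drop b = t →
    epLoop cs (ans.length + t.count '_') (b : Int) ans = ans ++ gIdx t (b : Int) := by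
  induction t with
  | nil =>
    intro cs b ans _ _
    rw [epLoop]
    simp [gIdx]
  | cons c t ih =>
    intro cs b ans hlen hdrop
    have hb : b ≤ cs.length := by
      simp only [List.length_cons] at hlen
      omega
    have hdrop1 : cs.drop (b + 1) = t := by
      have : cs.drop (b + 1) = (cs.drop b).drop 1 := by
        rw [List.drop_drop]
      rw [this, hdrop]; rfl
    have hff := PySem.Chars.findFrom_natCast cs ['_'] b hb
    rw [hdrop] at hff
    by_cases hc : c = '_'
    · subst hc
      rw [find_cons_self] at hff
      simp only [if_neg (by norm_num : (0 : Int) ≠ -1), add_zero] at hff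
      rw [epLoop]
      have hcnt : ('_' :: t).count '_' = t.count '_' + 1 := by simp [List.count_cons]
      rw [dif_pos (by omega)]
      simp only [hff]
      rw [if_neg (by omega)]
      have := ih cs (b + 1) (ans ++ [(b : Int)]) (by simp only [List.length_cons, List.length_append, List.length_singleton] at hlen ⊢; omega) hdrop1
      push_cast at this ⊢
      have hsz : ans.length + ('_' :: t).count '_' = (ans ++ [(b : Int)]).length + t.count '_' := by
        simp [hcnt]; omega
      rw [hsz, this]
      simp [gIdx]
    · -- skip step: findFrom from b equals findFrom from b+1
      have hff1 := PySem.Chars.findFrom_natCast cs ['_'] (b + 1)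
        (by simp only [List.length_cons] at hlen; omega)
      rw [hdrop1] at hff1
      push_cast at hff1
      rw [find_cons_ne c t hc] at hff
      have hskip : PySem.Chars.findFrom cs ['_'] (b : Int) none
          = PySem.Chars.findFrom cs ['_'] ((b : Int) + 1) none := by
        have hge := PySem.Chars.neg_one_le_find t ['_']
        by_cases h1 : PySem.Chars.find t ['_'] = -1
        · rw [hff, hff1, if_pos h1]
          simp [h1]
        · rw [hff, hff1, if_neg h1, if_neg (by omega), if_neg (by omega)]
          ring
      have step : epLoop cs (ans.length + (c :: t).count '_') (b : Int) ans
          = epLoop cs (ans.length + (c :: t).count '_') ((b : Int) + 1) ans := by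
        rw [epLoop, epLoop, hskip]
      rw [step]
      have hcnt : (c :: t).count '_' = t.count '_' := by
        simp [List.count_cons, hc, Ne.symm hc]
      have := ih cs (b + 1) ans (by simp only [List.length_cons, List.length_append, List.length_singleton] at hlen ⊢; omega) hdrop1
      push_cast at this
      rw [hcnt, this]
      simp [gIdx, hc]

theorem count_go_eq (fuel : Nat) : ∀ (t : List Char) (acc : Nat), t.length ≤ fuel →
    PySem.Chars.count.go ['_'] fuel t acc = acc + t.count '_' := by
  induction fuel with
  | zero =>
    intro t acc h
    cases t with
    | nil => simp [PySem.Chars.count.go]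
    | cons c t => simp at h
  | succ n ih =>
    intro t acc h
    cases t with
    | nil => simp [PySem.Chars.count.go]
    | cons c t =>
      simp only [PySem.Chars.count.go]
      by_cases hc : c = '_'
      · subst hc
        rw [if_pos (by simp [List.isPrefixOf])]
        simp only [List.length_singleton, List.drop_one, List.tail_cons]
        rw [ih t (acc + 1) (by simpa using h)]
        simp [List.count_cons]; omega
      · rw [if_neg (by simp [List.isPrefixOf]; exact fun e => hc e.symm)]
        rw [ih t acc (by simpa using h)]
        simp [List.count_cons, hc]

theorem count_eq_count (t : List Char) : PySem.Chars.count t ['_'] = t.count '_' := by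
  rw [PySem.Chars.count]
  simp only [List.isEmpty_cons, if_false, Bool.false_eq_true]
  simpa using count_go_eq t.length t 0 le_rfl

-- ===== VERDICT (by name: the statement is the Claim_ definition above) =====
theorem empty_positions_spec : Claim_equal_empty_positions := by
  intro state _
  unfold Spec_empty_positions empty_positions empty_positions_alt
  rw [PySem.Str.count_eq]
  have hc : (PySem.Chars.count state.toList "_".toList) = state.toList.count '_' := by
    have : "_".toList = ['_'] := rfl
    rw [this, count_eq_count]
  rw [hc, alt_eq_gIdx]
  have := epLoop_eq state.toList state.toList 0 [] (by simp) (by simp)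
  simpa using this
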